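-- pv_equiv track=rewrite | github.com/EmanuelaBoros/GENRE | genre/model.py | _is_prediction_complete
-- ===== SOURCE A (Python) =====
-- def _is_prediction_complete(text, prediction):
--     len_text = 0
--     for char in text:
--         if char != " ":
--             len_text += 1
--     len_prediction = 0
--     inside_prediction = False
--     for char in prediction:
--         if char in " {}":
--             continue
--         elif char == "[":
--             inside_prediction = True
--         elif char == "]":
--             inside_prediction = False
--         elif not inside_prediction:
--             len_prediction += 1
--     return len_text == len_prediction
-- ===== SOURCE B (Python) =====
-- def _is_prediction_complete(text, prediction):
--     len_text = sum(c != " " for c in text)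
--     len_prediction = sum(
--         sum(c not in " {}" for c in seg.split("[")[0])
--         for seg in prediction.split("]")
--     )
--     return len_text == len_prediction
-- ===== Notes on version B (the rewrite author's own statement) =====
-- stated objective: idiomatic
-- what changed: Replaces A's character-by-character inside/outside boolean state machine over the prediction with a split-and-count pass: split the prediction on ']' and, in each piece, count the non-' {}' characters before its first '['; the text side becomes a sum comprehension.
import Mathlib
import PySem

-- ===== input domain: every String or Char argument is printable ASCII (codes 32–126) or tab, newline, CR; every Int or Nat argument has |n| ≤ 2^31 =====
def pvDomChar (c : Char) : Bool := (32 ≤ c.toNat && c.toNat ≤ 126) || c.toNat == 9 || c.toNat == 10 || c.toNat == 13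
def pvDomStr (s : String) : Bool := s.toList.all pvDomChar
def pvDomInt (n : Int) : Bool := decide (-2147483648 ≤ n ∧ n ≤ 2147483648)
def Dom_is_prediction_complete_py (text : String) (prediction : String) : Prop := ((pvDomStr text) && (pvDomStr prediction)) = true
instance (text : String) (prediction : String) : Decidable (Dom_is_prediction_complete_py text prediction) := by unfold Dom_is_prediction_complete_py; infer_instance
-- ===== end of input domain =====

-- B replaces A's per-character inside/outside flag state machine with an idiomatic
-- split-and-count: split the prediction on ']' and count, in each piece, the
-- non-" {}" characters before its first '['.  (objective: idiomatic; not faster)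


-- ===== PORT A =====
-- one step of A's prediction loop: state = (len_prediction, inside_prediction)
def pvStepA (st : Int × Bool) (c : Char) : Int × Bool :=
  if c = ' ' ∨ c = '{' ∨ c = '}' then st
  else if c = '[' then (st.1, true)
  else if c = ']' then (st.1, false)
  else if ¬ st.2 then (st.1 + 1, st.2)
  else st

def is_prediction_complete_py (text : String) (prediction : String) : Bool :=
  let len_text : Int := text.toList.foldl (fun n c => if c ≠ ' ' then n + 1 else n) 0
  let st := prediction.toList.foldl pvStepA ((0 : Int), false)
  decide (len_text = st.1)

-- ===== PORT B =====
def is_prediction_complete_py_alt (text : String) (prediction : String) : Bool :=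
  let len_text : Int := (text.toList.map (fun c => if c ≠ ' ' then (1 : Int) else 0)).sum
  let len_prediction : Int :=
    ((PySem.Chars.splitOn prediction.toList [']']).map (fun seg =>
      ((PySem.Chars.splitOn seg ['[']).headI.map
        (fun c => if ¬ (c = ' ' ∨ c = '{' ∨ c = '}') then (1 : Int) else 0)).sum)).sum
  decide (len_text = len_prediction)

-- ===== PRECONDITION & SPEC =====
def Spec_is_prediction_complete_py (text : String) (prediction : String) (out : Bool) : Prop := out = is_prediction_complete_py_alt text prediction
instance (text : String) (prediction : String) (out : Bool) : Decidable (Spec_is_prediction_complete_py text prediction out) := by unfold Spec_is_prediction_complete_py; infer_instance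

-- ===== CLAIM (what is proved, stated in full; the proofs are below) =====
def Claim_equal_is_prediction_complete_py : Prop := ∀ (text : String) (prediction : String), Dom_is_prediction_complete_py text prediction → Spec_is_prediction_complete_py text prediction (is_prediction_complete_py text prediction)

-- ===== LEMMAS AND PROOFS =====

-- split on a single character, recursively (proved equal to PySem.Chars.splitOn l [c])
def splitCh (c : Char) : List Char → List (List Char)
  | [] => [[]]
  | x :: t => if x = c then [] :: splitCh c t else (splitCh c t).modifyHead (x :: ·)

lemma splitCh_ne_nil (c : Char) (l : List Char) : splitCh c l ≠ [] := by
  induction l with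
  | nil => simp [splitCh]
  | cons x t ih =>
    simp only [splitCh]
    split
    · simp
    · cases h : splitCh c t with
      | nil => exact absurd h ih
      | cons a b => simp

lemma modifyHead_fun_id {α : Type} (l : List α) : List.modifyHead (fun x => x) l = l := by
  cases l <;> simp

lemma go_single (c : Char) :
    ∀ (l : List Char) (fuel : Nat), l.length ≤ fuel →
      ∀ (cur : List Char) (acc : List (List Char)),
        PySem.Chars.splitOn.go [c] fuel l cur acc
          = acc.reverse ++ (splitCh c l).modifyHead (cur.reverse ++ ·) := by
  intro l
  induction l with
  | nil =>
    intro fuel _ cur acc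
    cases fuel <;> simp [PySem.Chars.splitOn.go, splitCh]
  | cons x t ih =>
    intro fuel hf cur acc
    cases fuel with
    | zero => simp at hf
    | succ f =>
      by_cases hx : x = c
      · subst hx
        have hp : ([x].isPrefixOf (x :: t)) = true := by simp [List.isPrefixOf]
        simp only [PySem.Chars.splitOn.go, hp, if_pos, List.length_cons, List.length_nil,
          Nat.zero_add, List.drop_succ_cons, List.drop_zero]
        rw [ih f (by simpa using hf) [] (cur.reverse :: acc)]
        simp [splitCh, modifyHead_fun_id]
      · have hp : ([c].isPrefixOf (x :: t)) = false := by
          simp [List.isPrefixOf]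
          exact fun h => absurd h.symm hx
        simp only [PySem.Chars.splitOn.go, hp, Bool.false_eq_true, if_neg, not_false_iff]
        rw [ih f (by simpa using hf) (x :: cur) acc]
        cases h : splitCh c t with
        | nil => exact absurd h (splitCh_ne_nil c t)
        | cons a b => simp [splitCh, hx, h]

lemma splitOn_single (c : Char) (l : List Char) :
    PySem.Chars.splitOn l [c] = splitCh c l := by
  rw [PySem.Chars.splitOn, go_single c l (l.length + 1) (by omega) [] []]
  simp [modifyHead_fun_id]

-- per-character weight used by B's inner count
def wCh (c : Char) : Int := if ¬ (c = ' ' ∨ c = '{' ∨ c = '}') then 1 else 0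

-- B's count for one ']'-segment
def segCount (seg : List Char) : Int := ((splitCh '[' seg).headI.map wCh).sum

lemma segCount_nil : segCount [] = 0 := by simp [segCount, splitCh]

lemma segCount_cons (c : Char) (seg : List Char) :
    segCount (c :: seg) = if c = '[' then 0 else wCh c + segCount seg := by
  by_cases hc : c = '['
  · simp [segCount, splitCh, hc]
  · cases h : splitCh '[' seg with
    | nil => exact absurd h (splitCh_ne_nil _ _)
    | cons a b => simp [segCount, splitCh, hc, h]

-- A's count, as a recursive function of the remaining input and the flag
def predCount : List Char → Bool → Int
  | [], _ => 0
  | c :: t, i =>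
    if c = ' ' ∨ c = '{' ∨ c = '}' then predCount t i
    else if c = '[' then predCount t true
    else if c = ']' then predCount t false
    else if ¬ i then 1 + predCount t i
    else predCount t i

lemma foldl_stepA (l : List Char) : ∀ (n : Int) (i : Bool),
    (List.foldl pvStepA (n, i) l).1 = n + predCount l i := by
  induction l with
  | nil => intro n i; simp [predCount]
  | cons c t ih =>
    intro n i
    simp only [List.foldl_cons, predCount, pvStepA]
    by_cases h1 : c = ' ' ∨ c = '{' ∨ c = '}'
    · simp [h1, ih]
    · by_cases h2 : c = '['
      · simp [h2, ih]
      · by_cases h3 : c = ']'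
        · simp [h3, ih]
        · cases i with
          | false => simp [h1, h2, h3, ih]; ring
          | true => simp [h1, h2, h3, ih]

lemma predCount_eq_splitCh (l : List Char) :
    predCount l false = ((splitCh ']' l).map segCount).sum ∧
    predCount l true = (((splitCh ']' l).tail).map segCount).sum := by
  induction l with
  | nil => simp [predCount, splitCh, segCount_nil]
  | cons c t ih =>
    by_cases h3 : c = ']'
    · subst h3
      have hsp : splitCh ']' (']' :: t) = [] :: splitCh ']' t := by simp [splitCh]
      constructor <;> · simp [predCount, hsp, segCount_nil, ih.1]
    · obtain ⟨h0, t0, hsp⟩ : ∃ h0 t0, splitCh ']' t = h0 :: t0 := by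
        cases h : splitCh ']' t with
        | nil => exact absurd h (splitCh_ne_nil _ _)
        | cons a b => exact ⟨a, b, rfl⟩
      have hsp' : splitCh ']' (c :: t) = (c :: h0) :: t0 := by
        simp [splitCh, h3, hsp]
      by_cases h1 : c = ' ' ∨ c = '{' ∨ c = '}'
      · have h2 : c ≠ '[' := by rcases h1 with h | h | h <;> subst h <;> decide
        have hw : wCh c = 0 := by simp [wCh, h1]
        have ih1 := ih.1; rw [hsp] at ih1; simp at ih1
        constructor
        · simp [predCount, h1, hsp', segCount_cons, h2, hw, ih1]
        · simp [predCount, h1, hsp', hsp, ih.2]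
      · by_cases h2 : c = '['
        · subst h2
          have ih2 := ih.2; rw [hsp] at ih2; simp at ih2
          constructor
          · simp [predCount, hsp', segCount_cons, ih2]
          · simp [predCount, hsp', hsp, ih.2]
        · have hw : wCh c = 1 := by simp [wCh, h1]
          have ih1 := ih.1; rw [hsp] at ih1; simp at ih1
          constructor
          · simp [predCount, h1, h2, h3, hsp', segCount_cons, hw, ih1]; ring
          · simp [predCount, h1, h2, h3, hsp', hsp, ih.2]

lemma text_count_eq (l : List Char) : ∀ n : Int,
    l.foldl (fun n c => if c ≠ ' ' then n + 1 else n) n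
      = n + (l.map (fun c => if c ≠ ' ' then (1 : Int) else 0)).sum := by
  induction l with
  | nil => intro n; simp
  | cons c t ih =>
    intro n
    simp only [List.foldl_cons, List.map_cons, List.sum_cons, ih]
    by_cases h : c = ' '
    · simp [h]
    · simp [h]; ring

-- ===== VERDICT (by name: the statement is the Claim_ definition above) =====
theorem is_prediction_complete_py_spec : Claim_equal_is_prediction_complete_py := by
  intro text prediction _
  show _ = _
  unfold is_prediction_complete_py is_prediction_complete_py_alt
  simp only [splitOn_single, text_count_eq, foldl_stepA, zero_add]
  rw [(predCount_eq_splitCh prediction.toList).1]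
  rfl
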